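-- pv_equiv track=rewrite | github.com/mahaalghuraibi/SKA | backend/app/services/yolo_monitoring_service.py | _tile_starts
-- ===== SOURCE A (Python) =====
-- _TILE_SIZE: int = 640
--
-- _TILE_OVERLAP: int = 160
--
-- def _tile_starts(dim: int) -> list[int]:
--     if dim <= _TILE_SIZE:
--         return [0]
--     stride = _TILE_SIZE - _TILE_OVERLAP
--     starts: list[int] = [0]
--     while True:
--         nxt = starts[-1] + stride
--         if nxt + _TILE_SIZE >= dim:
--             nxt = dim - _TILE_SIZE
--         if nxt <= starts[-1]:
--             break
--         starts.append(nxt)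
--         if starts[-1] + _TILE_SIZE >= dim:
--             break
--     return starts
-- ===== SOURCE B (Python) =====
-- _TILE_SIZE: int = 640
--
-- _TILE_OVERLAP: int = 160
--
-- def _tile_starts(dim: int) -> list[int]:
--     if dim <= _TILE_SIZE:
--         return [0]
--     stride = _TILE_SIZE - _TILE_OVERLAP
--     return list(range(0, dim - _TILE_SIZE, stride)) + [dim - _TILE_SIZE]
-- ===== Notes on version B (the rewrite author's own statement) =====
-- stated objective: simpler
-- what changed: Replaces the stateful while-loop with inner clamp and two break conditions by a direct range(0, dim-640, 480) of regular tile starts plus a separately appended clamped boundary start dim-640.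
import Mathlib
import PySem

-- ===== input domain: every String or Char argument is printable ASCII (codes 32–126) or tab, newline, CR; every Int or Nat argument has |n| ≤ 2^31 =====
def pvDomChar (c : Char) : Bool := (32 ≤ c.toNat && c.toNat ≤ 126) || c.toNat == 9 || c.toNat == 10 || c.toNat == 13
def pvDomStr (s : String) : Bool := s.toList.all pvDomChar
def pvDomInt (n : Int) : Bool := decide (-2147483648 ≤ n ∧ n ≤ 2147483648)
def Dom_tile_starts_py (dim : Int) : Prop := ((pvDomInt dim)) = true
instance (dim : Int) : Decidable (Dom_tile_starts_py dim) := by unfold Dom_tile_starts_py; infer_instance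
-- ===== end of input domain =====

-- B replaces A's stateful while-loop (with inner clamp and two break conditions) by a
-- one-shot range of regular stride starts plus a separately appended clamped boundary tile;
-- objective: simpler. Both programs are total; return values agree on every Int.

-- ===== PORT A =====
-- A's while-loop: state is the last appended start (starts[-1]); each turn computes
-- nxt = last + stride, clamps it to dim - 640 when the tile would overrun, breaks if it
-- did not advance, appends, and breaks if the appended tile reaches the far edge.
def tileLoopA (dim last : Int) : List Int :=
  let nxt0 := last + (640 - 160)          -- nxt = starts[-1] + stride
  if dim ≤ nxt0 + 640 then                -- if nxt + _TILE_SIZE >= dim: nxt = dim - _TILE_SIZE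
    let nxt := dim - 640
    if nxt ≤ last then []                 -- if nxt <= starts[-1]: break
    else [nxt]                            -- append; then starts[-1] + 640 = dim ≥ dim: break
  else
    if nxt0 ≤ last then []                -- if nxt <= starts[-1]: break (A's check, here never true)
    else nxt0 :: tileLoopA dim nxt0       -- append; trailing check nxt0 + 640 >= dim is false: loop
termination_by (dim - last).toNat
decreasing_by omega

def tile_starts_py (dim : Int) : List Int :=
  if dim ≤ 640 then [0]
  else 0 :: tileLoopA dim 0               -- starts = [0]; while True: …

-- ===== PORT B =====
def tile_starts_py_alt (dim : Int) : List Int :=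
  if dim ≤ 640 then [0]
  else PySem.List.pyRange 0 (dim - 640) (640 - 160) ++ [dim - 640]

-- ===== PRECONDITION & SPEC =====
def Spec_tile_starts_py (dim : Int) (out : List Int) : Prop := out = tile_starts_py_alt dim
instance (dim : Int) (out : List Int) : Decidable (Spec_tile_starts_py dim out) := by unfold Spec_tile_starts_py; infer_instance

-- ===== CLAIM (what is proved, stated in full; the proofs are below) =====
def Claim_equal_tile_starts_py : Prop := ∀ (dim : Int), Dom_tile_starts_py dim → Spec_tile_starts_py dim (tile_starts_py dim)

-- ===== LEMMAS AND PROOFS =====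

-- range(a, b, s) with positive step and a < b starts at a and continues from a + s.
lemma pyRange_cons_of_pos {s : Int} (a b : Int) (hs : 0 < s) (hab : a < b) :
    PySem.List.pyRange a b s = a :: PySem.List.pyRange (a + s) b s := by
  rw [PySem.List.pyRange_of_pos a b hs, PySem.List.pyRange_of_pos (a + s) b hs]
  by_cases h2 : a + s < b
  · rw [if_pos hab, if_pos h2]
    have hq : (b - a + s - 1) / s = (b - (a + s) + s - 1) / s + 1 := by
      have := Int.add_mul_ediv_right (b - (a + s) + s - 1) 1 (by omega : s ≠ 0)
      rw [one_mul] at this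
      rw [← this]; ring_nf
    have hnn : 0 ≤ (b - (a + s) + s - 1) / s :=
      Int.ediv_nonneg (by omega) (by omega)
    rw [hq]
    have : ((b - (a + s) + s - 1) / s + 1).toNat = ((b - (a + s) + s - 1) / s).toNat + 1 := by
      omega
    rw [this, List.range_succ_eq_map, List.map_cons, List.map_map]
    refine congrArg₂ List.cons (by push_cast; ring) (List.map_congr_left ?_)
    intro k _
    simp only [Function.comp_apply, Nat.succ_eq_add_one]
    push_cast; ring
  · rw [if_pos hab, if_neg h2]
    have h1 : (b - a + s - 1) / s = 1 := by
      have he : PySem.Int.floordiv (b - a + s - 1) s = (b - a + s - 1) / s :=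
        PySem.Int.floordiv_eq_ediv_of_pos hs
      rw [← he, PySem.Int.floordiv_eq_iff_of_pos]
      · omega
      · exact hs
    rw [h1]
    simp

-- range(a, b, s) with positive step and b ≤ a is empty.
lemma pyRange_nil_of_pos {s : Int} (a b : Int) (hs : 0 < s) (hab : b ≤ a) :
    PySem.List.pyRange a b s = [] := by
  rw [PySem.List.pyRange_of_pos a b hs, if_neg (by omega)]
  simp

-- Loop characterization: while the last appended start still leaves room before the far
-- edge, the remaining loop output is the regular strided starts followed by the clamped one.
lemma tileLoopA_eq (dim last : Int) (h : last + 640 < dim) :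
    tileLoopA dim last = PySem.List.pyRange (last + 480) (dim - 640) 480 ++ [dim - 640] := by
  rw [tileLoopA.eq_def]
  dsimp only
  by_cases h1 : dim ≤ last + (640 - 160) + 640
  · rw [if_pos h1, if_neg (by omega : ¬ dim - 640 ≤ last),
        pyRange_nil_of_pos _ _ (by norm_num) (by omega : dim - 640 ≤ last + 480)]
    rfl
  · rw [if_neg h1, if_neg (by omega : ¬ last + (640 - 160) ≤ last),
        tileLoopA_eq dim (last + (640 - 160)) (by omega),
        pyRange_cons_of_pos (last + 480) (dim - 640) (by norm_num) (by omega)]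
    norm_num
termination_by (dim - last).toNat
decreasing_by omega

-- ===== VERDICT (by name: the statement is the Claim_ definition above) =====
theorem tile_starts_py_spec : Claim_equal_tile_starts_py := by
  intro dim _
  unfold Spec_tile_starts_py tile_starts_py tile_starts_py_alt
  by_cases h : dim ≤ 640
  · simp [h]
  · rw [if_neg h, if_neg h]
    have h0 : (0 : Int) + 640 < dim := by omega
    rw [tileLoopA_eq dim 0 h0,
        pyRange_cons_of_pos 0 (dim - 640) (by norm_num) (by omega)]
    norm_num
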